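-- pv_equiv track=rewrite | github.com/343549/Algosi | 2-sem/lab1/task20/solution.py | solve
-- ===== SOURCE A (Python) =====
-- def is_almost_palindrome(s, k):
--     """
--     Проверяет, является ли строка s почти палиндромом с k изменениями.
--     """
--     n = len(s)
--     # dp[i][j] - минимальное количество изменений для подстроки s[i:j+1]
--     dp = [[0] * n for _ in range(n)]
--
--     # Заполняем для подстрок длины 1 и 2
--     for i in range(n):
--         dp[i][i] = 0
--
--     for length in range(2, n + 1):
--         for i in range(n - length + 1):
--             j = i + length - 1
--             if s[i] == s[j]:
--                 if i + 1 <= j - 1: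
--                     dp[i][j] = dp[i + 1][j - 1]
--                 else:
--                     dp[i][j] = 0
--             else:
--                 if i + 1 <= j - 1:
--                     dp[i][j] = dp[i + 1][j - 1] + 1
--                 else:
--                     dp[i][j] = 1
--
--     return dp[0][n - 1] <= k
--
-- def solve(s, k):
--     """
--     Подсчитывает количество подслов, являющихся почти палиндромами.
--     """
--     n = len(s)
--     count = 0
--
--     # Перебираем все подслова
--     for i in range(n):
--         for j in range(i, n):
--             substring = s[i:j+1]
--             if is_almost_palindrome(substring, k):
--                 count += 1
--
--     return count
-- ===== SOURCE B (Python) =====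
-- def solve(s, k):
--     n = len(s)
--     cost = [[0] * n for _ in range(n)]
--     for length in range(2, n + 1):
--         for i in range(n - length + 1):
--             j = i + length - 1
--             cost[i][j] = cost[i + 1][j - 1] + (1 if s[i] != s[j] else 0)
--     return sum(1 for i in range(n) for j in range(i, n) if cost[i][j] <= k)
-- ===== Notes on version B (the rewrite author's own statement) =====
-- stated objective: faster
-- what changed: A builds a fresh full change-cost DP table for every one of the O(n^2) substrings (O(n^4)); B builds a single O(n^2) table cost[i][j] = cost[i+1][j-1] + (s[i] != s[j]) over the whole string once and counts the pairs with cost <= k.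
import Mathlib
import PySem

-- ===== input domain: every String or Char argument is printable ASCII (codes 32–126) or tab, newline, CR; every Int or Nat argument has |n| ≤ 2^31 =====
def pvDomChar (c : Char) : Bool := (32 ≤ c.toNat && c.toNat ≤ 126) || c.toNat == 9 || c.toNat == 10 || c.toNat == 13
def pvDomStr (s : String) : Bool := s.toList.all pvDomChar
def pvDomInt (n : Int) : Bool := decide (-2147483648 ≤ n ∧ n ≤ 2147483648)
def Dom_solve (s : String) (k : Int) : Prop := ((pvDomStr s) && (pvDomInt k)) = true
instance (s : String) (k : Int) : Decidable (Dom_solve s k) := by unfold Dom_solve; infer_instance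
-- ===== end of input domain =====

-- B replaces A's per-substring DP (a fresh O(m^2) table for each of the O(n^2) substrings, O(n^4))
-- by ONE O(n^2) table cost[i][j] = cost[i+1][j-1] + (s[i] != s[j]) over the whole string, then counts.

-- ===== PORT A =====
-- Python's 2D table (list of lists, all cells initialised to 0), modeled as a map from
-- cell index to value: dp[i][j] = v is an overwrite, reading an unwritten cell gives 0 (exact)
def pySet2 (dp : PySem.Dict (Nat × Nat) Int) (i j : Nat) (v : Int) : PySem.Dict (Nat × Nat) Int :=
  dp.insert (i, j) v

def pyGet2 (dp : PySem.Dict (Nat × Nat) Int) (a b : Nat) : Int :=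
  dp.getD (a, b) 0

-- transliteration of the dp-table construction inside is_almost_palindrome
def dpFillA (cs : List Char) (n : Nat) : PySem.Dict (Nat × Nat) Int :=
  let dp0 : PySem.Dict (Nat × Nat) Int := PySem.Dict.empty
  -- for i in range(n): dp[i][i] = 0
  let dp1 := (List.range n).foldl (fun dp i => pySet2 dp i i 0) dp0
  -- for length in range(2, n + 1): for i in range(n - length + 1): ...
  (List.range' 2 (n - 1)).foldl (fun dp length =>
    (List.range (n - length + 1)).foldl (fun dp i =>
      let j := i + length - 1
      if cs.getD i ' ' = cs.getD j ' ' then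
        (if i + 1 ≤ j - 1 then pySet2 dp i j (pyGet2 dp (i + 1) (j - 1)) else pySet2 dp i j 0)
      else
        (if i + 1 ≤ j - 1 then pySet2 dp i j (pyGet2 dp (i + 1) (j - 1) + 1) else pySet2 dp i j 1)) dp) dp1

-- is_almost_palindrome; solve only calls it on nonempty substrings, where dp[0][n-1] is in range
def isAlmostPalindrome (t : List Char) (k : Int) : Bool :=
  decide (pyGet2 (dpFillA t t.length) 0 (t.length - 1) ≤ k)

def solve (s : String) (k : Int) : Int :=
  let cs := s.toList
  let n := cs.length
  (List.range n).foldl (fun count i =>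
    (List.range' i (n - i)).foldl (fun count j =>
      -- substring = s[i:j+1]  (0 ≤ i ≤ j < n, so take/drop is exact)
      if isAlmostPalindrome ((cs.drop i).take (j + 1 - i)) k then count + 1 else count) count) 0

-- ===== PORT B =====
def costFill (cs : List Char) (n : Nat) : PySem.Dict (Nat × Nat) Int :=
  (List.range' 2 (n - 1)).foldl (fun cost length =>
    (List.range (n - length + 1)).foldl (fun cost i =>
      let j := i + length - 1
      pySet2 cost i j (pyGet2 cost (i + 1) (j - 1) + (if cs.getD i ' ' ≠ cs.getD j ' ' then 1 else 0))) cost)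
    PySem.Dict.empty

def solve_alt (s : String) (k : Int) : Int :=
  let cs := s.toList
  let n := cs.length
  let cost := costFill cs n
  (List.range n).foldl (fun acc i =>
    (List.range' i (n - i)).foldl (fun acc j =>
      if pyGet2 cost i j ≤ k then acc + 1 else acc) acc) 0

-- ===== PRECONDITION & SPEC =====
def Spec_solve (s : String) (k : Int) (out : Int) : Prop := out = solve_alt s k
instance (s : String) (k : Int) (out : Int) : Decidable (Spec_solve s k out) := by unfold Spec_solve; infer_instance

-- ===== CLAIM (what is proved, stated in full; the proofs are below) =====
def Claim_equal_solve : Prop := ∀ (s : String) (k : Int), Dom_solve s k → Spec_solve s k (solve s k)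

-- ===== LEMMAS AND PROOFS =====

-- the mathematical change-cost of making s[i..j] a palindrome
def pcost (cs : List Char) (i j : Nat) : Int :=
  if _h : i < j then
    (if cs.getD i ' ' = cs.getD j ' ' then 0 else 1) + pcost cs (i + 1) (j - 1)
  else 0
termination_by j - i
decreasing_by omega

theorem pcost_stop (cs : List Char) {i j : Nat} (h : ¬ i < j) : pcost cs i j = 0 := by
  rw [pcost]; simp [h]

theorem pcost_step (cs : List Char) {i j : Nat} (h : i < j) :
    pcost cs i j = (if cs.getD i ' ' = cs.getD j ' ' then 0 else 1) + pcost cs (i + 1) (j - 1) := by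
  rw [pcost]; simp [h]

theorem foldl_range_inv {α : Type} (f : α → Nat → α) (P : Nat → α → Prop) (n : Nat) (a : α)
    (h0 : P 0 a) (hs : ∀ t x, t < n → P t x → P (t + 1) (f x t)) :
    P n ((List.range n).foldl f a) := by
  induction n with
  | zero => simpa using h0
  | succ m ih =>
    rw [List.range_succ, List.foldl_append]
    exact hs m _ (Nat.lt_succ_self m)
      (ih (fun t x ht hx => hs t x (ht.trans (Nat.lt_succ_self m)) hx))

theorem foldl_range'_inv {α : Type} (f : α → Nat → α) (P : Nat → α → Prop) (s n : Nat) (a : α)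
    (h0 : P 0 a) (hs : ∀ t x, t < n → P t x → P (t + 1) (f x (s + t))) :
    P n ((List.range' s n).foldl f a) := by
  induction n with
  | zero => simpa using h0
  | succ m ih =>
    rw [List.range'_concat, List.foldl_append]
    have := hs m ((List.range' s m).foldl f a) (Nat.lt_succ_self m)
      (ih (fun t x ht hx => hs t x (ht.trans (Nat.lt_succ_self m)) hx))
    simpa using this

theorem pyGet2_set2 (dp : PySem.Dict (Nat × Nat) Int) (i j a b : Nat) (v : Int) :
    pyGet2 (pySet2 dp i j v) a b = if a = i ∧ b = j then v else pyGet2 dp a b := by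
  simp [pyGet2, pySet2, PySem.Dict.getD_insert, Prod.ext_iff]

-- any diagonal-by-diagonal fill whose step writes the correct value (given correct shorter
-- diagonals and earlier cells of the current one) computes pcost everywhere below row bound n
theorem diag_fill_correct (cs : List Char) (n : Nat)
    (step : PySem.Dict (Nat × Nat) Int → Nat → Nat → PySem.Dict (Nat × Nat) Int)
    (init : PySem.Dict (Nat × Nat) Int) (hinit : ∀ a b, pyGet2 init a b = 0)
    (hstep : ∀ dp L i, 2 ≤ L → i + L ≤ n →
      (∀ a b, b < n → (b < a + (L - 1) ∨ (b = a + (L - 1) ∧ a < i)) → pyGet2 dp a b = pcost cs a b) →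
      step dp L i = pySet2 dp i (i + L - 1) (pcost cs i (i + L - 1)))
    (i j : Nat) (hj : j < n) :
    pyGet2 ((List.range' 2 (n - 1)).foldl
      (fun dp L => (List.range (n - L + 1)).foldl (fun dp i => step dp L i) dp) init) i j
      = pcost cs i j := by
  have main := foldl_range'_inv
    (fun dp L => (List.range (n - L + 1)).foldl (fun dp i => step dp L i) dp)
    (fun t dp => ∀ a b, b < n → b < a + (t + 1) → pyGet2 dp a b = pcost cs a b)
    2 (n - 1) init
    (fun a b _ hba => by rw [hinit, pcost_stop cs (by omega)])
    ?_
  · exact main i j hj (by omega)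
  · intro t dp ht hP
    have inner := foldl_range_inv (fun dp i => step dp (2 + t) i)
      (fun m dp => ∀ a b, b < n →
        (b < a + (t + 1) ∨ (b = a + (t + 1) ∧ a < m)) → pyGet2 dp a b = pcost cs a b)
      (n - (2 + t) + 1) dp
      (fun a b hb hc => hP a b hb (by omega))
      ?_
    · intro a b hb hba
      exact inner a b hb (by omega)
    · intro m x hm hQ
      have hx : (fun dp i => step dp (2 + t) i) x m
          = pySet2 x m (m + (2 + t) - 1) (pcost cs m (m + (2 + t) - 1)) :=
        hstep x (2 + t) m (by omega) (by omega) (fun a b hb hc => hQ a b hb (by omega))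
      intro a b hb hc
      rw [hx, pyGet2_set2]
      split_ifs with hab
      · obtain ⟨h1, h2⟩ := hab; subst h1; subst h2; rfl
      · exact hQ a b hb (by omega)

theorem costFill_correct (cs : List Char) (n i j : Nat) (hj : j < n) :
    pyGet2 (costFill cs n) i j = pcost cs i j := by
  have h := diag_fill_correct cs n
    (fun dp L i => pySet2 dp i (i + L - 1)
      (pyGet2 dp (i + 1) (i + L - 1 - 1) + (if cs.getD i ' ' ≠ cs.getD (i + L - 1) ' ' then 1 else 0)))
    PySem.Dict.empty (fun _ _ => rfl)
    ?_ i j hj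
  · exact h
  · intro dp L i hL hiL hInv
    have hval : pyGet2 dp (i + 1) (i + L - 1 - 1)
        + (if cs.getD i ' ' ≠ cs.getD (i + L - 1) ' ' then 1 else 0) = pcost cs i (i + L - 1) := by
      rw [hInv (i + 1) (i + L - 1 - 1) (by omega) (Or.inl (by omega)),
        pcost_step cs (show i < i + L - 1 by omega)]
      by_cases heq : cs.getD i ' ' = cs.getD (i + L - 1) ' '
      · rw [if_neg (fun h => h heq), if_pos heq]
        omega
      · rw [if_pos heq, if_neg heq]
        omega
    beta_reduce
    rw [hval]

theorem dpFillA_correct (cs : List Char) (n i j : Nat) (hj : j < n) :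
    pyGet2 (dpFillA cs n) i j = pcost cs i j := by
  have hinit : ∀ a b, pyGet2 ((List.range n).foldl (fun dp i => pySet2 dp i i 0)
      PySem.Dict.empty) a b = 0 := by
    have := foldl_range_inv (fun dp i => pySet2 dp i i 0)
      (fun _ dp => ∀ a b, pyGet2 dp a b = (0 : Int)) n PySem.Dict.empty
      (fun _ _ => rfl)
      (fun t x _ hx a b => by
        rw [pyGet2_set2]
        split_ifs with h
        · rfl
        · exact hx a b)
    exact this
  have h := diag_fill_correct cs n
    (fun dp L i =>
      if cs.getD i ' ' = cs.getD (i + L - 1) ' ' then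
        (if i + 1 ≤ i + L - 1 - 1 then pySet2 dp i (i + L - 1) (pyGet2 dp (i + 1) (i + L - 1 - 1))
         else pySet2 dp i (i + L - 1) 0)
      else
        (if i + 1 ≤ i + L - 1 - 1 then pySet2 dp i (i + L - 1) (pyGet2 dp (i + 1) (i + L - 1 - 1) + 1)
         else pySet2 dp i (i + L - 1) 1))
    ((List.range n).foldl (fun dp i => pySet2 dp i i 0) PySem.Dict.empty)
    hinit ?_ i j hj
  · exact h
  · intro dp L i hL hiL hInv
    have hij : i < i + L - 1 := by omega
    beta_reduce
    by_cases heq : cs.getD i ' ' = cs.getD (i + L - 1) ' ' <;>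
      by_cases hle : i + 1 ≤ i + L - 1 - 1
    · rw [if_pos heq, if_pos hle]
      congr 1
      rw [hInv (i + 1) (i + L - 1 - 1) (by omega) (Or.inl (by omega)), pcost_step cs hij,
        if_pos heq]
      omega
    · rw [if_pos heq, if_neg hle]
      congr 1
      rw [pcost_step cs hij, pcost_stop cs (show ¬ i + 1 < i + L - 1 - 1 from by omega),
        if_pos heq]
      omega
    · rw [if_neg heq, if_pos hle]
      congr 1
      rw [hInv (i + 1) (i + L - 1 - 1) (by omega) (Or.inl (by omega)), pcost_step cs hij,
        if_neg heq]
      omega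
    · rw [if_neg heq, if_neg hle]
      congr 1
      rw [pcost_step cs hij, pcost_stop cs (show ¬ i + 1 < i + L - 1 - 1 from by omega),
        if_neg heq]
      omega

theorem pcost_shift (cs sub : List Char) (i : Nat)
    (hget : ∀ a, a < sub.length → sub.getD a ' ' = cs.getD (i + a) ' ') :
    ∀ d a b, b - a = d → b < sub.length → pcost sub a b = pcost cs (i + a) (i + b) := by
  intro d
  induction d using Nat.strong_induction_on with
  | _ d ih =>
    intro a b hd hb
    by_cases h : a < b
    · rw [pcost_step sub h, pcost_step cs (show i + a < i + b by omega)]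
      rw [hget a (by omega), hget b hb]
      have hrec := ih (b - 1 - (a + 1)) (by omega) (a + 1) (b - 1) rfl (by omega)
      rw [show i + (a + 1) = i + a + 1 from by omega,
          show i + (b - 1) = i + b - 1 from by omega] at hrec
      rw [hrec]
    · rw [pcost_stop sub h, pcost_stop cs (show ¬ i + a < i + b by omega)]

theorem isAlmost_eq_pcost (cs : List Char) (i j : Nat) (hij : i ≤ j) (hj : j < cs.length) (k : Int) :
    isAlmostPalindrome ((cs.drop i).take (j + 1 - i)) k = decide (pcost cs i j ≤ k) := by
  have hlen : ((cs.drop i).take (j + 1 - i)).length = j + 1 - i := by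
    simp [List.length_take, List.length_drop]; omega
  have hget : ∀ a, a < ((cs.drop i).take (j + 1 - i)).length →
      ((cs.drop i).take (j + 1 - i)).getD a ' ' = cs.getD (i + a) ' ' := by
    intro a ha
    have ha2 : a < j + 1 - i := by omega
    have ha' : i + a < cs.length := by omega
    rw [List.getD_eq_getElem _ ' ' ha, List.getD_eq_getElem cs ' ' ha']
    simp [List.getElem_take, List.getElem_drop]
  unfold isAlmostPalindrome
  have hkey : pyGet2 (dpFillA ((cs.drop i).take (j + 1 - i)) ((cs.drop i).take (j + 1 - i)).length) 0
      (((cs.drop i).take (j + 1 - i)).length - 1) = pcost cs i j := by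
    rw [dpFillA_correct _ _ 0 _ (by omega)]
    rw [pcost_shift cs _ i hget _ 0 _ rfl (by omega)]
    rw [show i + 0 = i from rfl, show i + (((cs.drop i).take (j + 1 - i)).length - 1) = j from by omega]
  rw [hkey]

-- ===== VERDICT (by name: the statement is the Claim_ definition above) =====
theorem solve_spec : Claim_equal_solve := by
  intro s k _
  unfold Spec_solve solve solve_alt
  refine PySem.List.foldl_congr_mem _ _ _ _ ?_
  intro acc i hi
  have hi' : i < s.toList.length := List.mem_range.mp hi
  refine PySem.List.foldl_congr_mem _ _ _ _ ?_
  intro acc2 jx hjx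
  have hjx' := List.mem_range'_1.mp hjx
  rw [isAlmost_eq_pcost s.toList i jx hjx'.1 (by omega) k,
      costFill_correct s.toList s.toList.length i jx (by omega)]
  simp
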